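-- pv_equiv track=rewrite | github.com/jviszlai/Bayesian-inference-coresets | active_coresets/QBM.py | _gen_states
-- ===== SOURCE A (Python) =====
-- from typing import List, Tuple, Iterable
--
-- def _gen_states(n: int) -> List[Tuple[int]]:
--     """
--     Generate all binary states with length n
--     """
--     bitstrings = []
--     for i in range(int(2**n)):
--         bitstrings.append(f'{i:0{n}b}')
--
--     states = []
--     for bitstr in bitstrings:
--         state = [1 if b == '0' else -1 for b in bitstr]
--         states.append(tuple(state))
--
--     return states
-- ===== SOURCE B (Python) =====
-- from typing import List, Tuple
--
-- def _gen_states(n: int) -> List[Tuple[int]]: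
--     """
--     Generate all binary states with length n
--     """
--     if n < 0:
--         return []
--     if n == 0:
--         return [()]
--     return [s + (v,) for s in _gen_states(n - 1) for v in (1, -1)]
-- ===== Notes on version B (the rewrite author's own statement) =====
-- stated objective: simpler
-- what changed: B builds the 2^n states by recursive Cartesian extension (each state of length n-1 extended by 1 and by -1) instead of counting through range(2**n), zero-padded binary string formatting and per-character parsing.
-- intended difference: For n = 0 A returns [(1,)] because f'{0:00b}' still formats 0 as the one-character string '0', while B returns [()], the single empty state, which is the correct set of length-0 states. — e.g. on _gen_states(0): A returns [[1]], B returns [[]]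
import Mathlib
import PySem

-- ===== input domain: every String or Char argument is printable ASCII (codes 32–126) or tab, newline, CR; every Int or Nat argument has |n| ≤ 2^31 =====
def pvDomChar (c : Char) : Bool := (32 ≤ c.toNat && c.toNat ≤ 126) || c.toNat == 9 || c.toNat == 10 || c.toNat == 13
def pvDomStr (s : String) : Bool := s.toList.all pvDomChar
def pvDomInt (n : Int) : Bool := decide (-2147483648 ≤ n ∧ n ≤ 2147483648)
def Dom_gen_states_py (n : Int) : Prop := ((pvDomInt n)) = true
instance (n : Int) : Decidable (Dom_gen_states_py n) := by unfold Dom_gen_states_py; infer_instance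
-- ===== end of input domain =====

-- B builds the 2^n states by recursive Cartesian extension instead of formatting and
-- parsing zero-padded binary strings; simpler, same cost.


-- ===== PORT A =====
-- hand port of Python's binary formatting: digits of i, MSB first ('' for i = 0)
def pvBinDigits (i : Nat) : List Char :=
  if h : i = 0 then []
  else pvBinDigits (i / 2) ++ [if i % 2 = 0 then '0' else '1']
  decreasing_by exact Nat.div_lt_self (Nat.pos_of_ne_zero h) (by omega)

-- hand port of f'{i:0{w}b}': binary digits of i ('0' for i = 0), zero-padded on the left to width w; exact for i, w ≥ 0
def pvBinPad (i w : Nat) : List Char :=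
  let ds := if i = 0 then ['0'] else pvBinDigits i
  List.replicate (w - ds.length) '0' ++ ds

def gen_states_py (n : Int) : List (List Int) :=
  -- int(2**n): 0 for negative n (the float 2**n floors to 0), else 2^n
  let cnt : Nat := if n < 0 then 0 else 2 ^ n.toNat
  let bitstrings : List (List Char) := (List.range cnt).map (fun i => pvBinPad i n.toNat)
  bitstrings.map (fun bitstr => bitstr.map (fun b => if b = '0' then (1 : Int) else -1))

-- ===== PORT B =====
-- Source B's recursion on n, realized structurally on the natural number n.toNat
-- (exact: the recursive branch only runs for n ≥ 1, where n.toNat counts the calls;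
-- pvAltGo 0 is Source B's `n == 0` base case)
def pvAltGo : Nat → List (List Int)
  | 0 => [[]]
  | m + 1 => (pvAltGo m).flatMap (fun s => ([1, -1] : List Int).map (fun v => s ++ [v]))

def gen_states_py_alt (n : Int) : List (List Int) :=
  if n < 0 then [] else pvAltGo n.toNat

-- ===== PRECONDITION & SPEC =====
-- For n = 0 A returns [(1,)] because f'{0:00b}' still formats 0 as the one-character
-- string '0', while B returns [()], the single empty state, which is the correct set
-- of length-0 states.
def D_gen_states_py (n : Int) : Prop := n = 0
instance (n : Int) : Decidable (D_gen_states_py n) := by unfold D_gen_states_py; infer_instance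

def Spec_gen_states_py (n : Int) (out : List (List Int)) : Prop :=
  ¬ D_gen_states_py n → out = gen_states_py_alt n
instance (n : Int) (out : List (List Int)) : Decidable (Spec_gen_states_py n out) := by
  unfold Spec_gen_states_py; infer_instance

def pvDiffWitness_gen_states_py : Int := (0)
def pvDiffWitnessOut_gen_states_py : (List (List Int)) × (List (List Int)) := ([[1]], [[]])

-- ===== CLAIM (what is proved, stated in full; the proofs are below) =====
def Claim_unchanged_gen_states_py : Prop := ∀ (n : Int), Dom_gen_states_py n → Spec_gen_states_py n (gen_states_py n)
def Claim_changed_gen_states_py : Prop := Dom_gen_states_py (pvDiffWitness_gen_states_py) ∧ D_gen_states_py (pvDiffWitness_gen_states_py) ∧ gen_states_py (pvDiffWitness_gen_states_py) = pvDiffWitnessOut_gen_states_py.1 ∧ gen_states_py_alt (pvDiffWitness_gen_states_py) = pvDiffWitnessOut_gen_states_py.2 ∧ pvDiffWitnessOut_gen_states_py.1 ≠ pvDiffWitnessOut_gen_states_py.2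
def Claim_exact_gen_states_py : Prop := ∀ (n : Int), Dom_gen_states_py n → D_gen_states_py n → gen_states_py n ≠ gen_states_py_alt n

-- ===== LEMMAS AND PROOFS =====

-- canonical MSB-first width-w binary representation
def pvBinRep (i : Nat) : Nat → List Char
  | 0 => []
  | w + 1 => pvBinRep (i / 2) w ++ [if i % 2 = 0 then '0' else '1']

lemma pvBinRep_zero (w : Nat) : pvBinRep 0 w = List.replicate w '0' := by
  induction w with
  | zero => rfl
  | succ w ih => simp [pvBinRep, ih, List.replicate_succ' (n := w)]

lemma pvBinPad_eq_binRep : ∀ w, 1 ≤ w → ∀ i, i < 2 ^ w → pvBinPad i w = pvBinRep i w := by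
  intro w
  induction w with
  | zero => omega
  | succ w ih =>
    intro _ i hi
    by_cases h0 : i = 0
    · subst h0
      simp [pvBinPad, pvBinRep, pvBinRep_zero, Nat.zero_div]
    · by_cases h1 : i = 1
      · subst h1
        simp [pvBinPad, pvBinRep, pvBinDigits, pvBinRep_zero]
      · -- i ≥ 2, so i / 2 ≥ 1 and w ≥ 1
        have hw : 1 ≤ w := by
          by_contra h
          have : w = 0 := by omega
          subst this; simp at hi; omega
        have hdiv : i / 2 ≠ 0 := by omega
        have hlt : i / 2 < 2 ^ w := by
          have h2 : i < 2 ^ w * 2 := by rw [pow_succ] at hi; omega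
          omega
        have ihh := ih hw (i / 2) hlt
        simp only [pvBinPad, if_neg hdiv] at ihh
        rw [pvBinPad, pvBinRep, ← ihh]
        simp only [if_neg h0]
        rw [pvBinDigits]
        simp only [dif_neg h0]
        have hlen : w + 1 - ((pvBinDigits (i / 2)).length + 1)
            = w - (pvBinDigits (i / 2)).length := by omega
        rw [List.length_append, List.length_singleton, hlen, ← List.append_assoc]

lemma pvRangeTwoMul (k : Nat) (g : Nat → List Int) :
    (List.range (2 * k)).map g
      = (List.range k).flatMap (fun j => [g (2 * j), g (2 * j + 1)]) := by
  induction k with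
  | zero => simp
  | succ k ih =>
    have : 2 * (k + 1) = (2 * k + 1) + 1 := by ring
    rw [this, List.range_succ, List.range_succ, List.range_succ]
    simp [ih, List.flatMap_append]

-- the character-to-±1 decoding
def pvDec (b : Char) : Int := if b = '0' then 1 else -1

-- the canonical width-m enumeration, in A's order
def pvCanon (m : Nat) : List (List Int) :=
  (List.range (2 ^ m)).map (fun i => (pvBinRep i m).map pvDec)

lemma pvCanon_succ (m : Nat) :
    pvCanon (m + 1) = (pvCanon m).flatMap (fun s => [s ++ [1], s ++ [-1]]) := by
  unfold pvCanon
  have h2 : 2 ^ (m + 1) = 2 * 2 ^ m := by ring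
  rw [h2, pvRangeTwoMul]
  simp only [List.flatMap_map]
  apply List.flatMap_congr
  intro j _
  have e0 : (2 * j) / 2 = j := by omega
  have e1 : (2 * j + 1) / 2 = j := by omega
  have o0 : (2 * j) % 2 = 0 := by omega
  have o1 : (2 * j + 1) % 2 = 1 := by omega
  simp [pvBinRep, e0, e1, o0, o1, pvDec]

lemma pvCanon_eq_go : ∀ m : Nat, pvCanon m = pvAltGo m := by
  intro m
  induction m with
  | zero => simp [pvCanon, pvBinRep, pvAltGo]
  | succ m ih =>
    rw [pvAltGo, ← ih, pvCanon_succ]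
    apply List.flatMap_congr
    intro s _
    simp

-- ===== VERDICT (by name: the statement is the Claim_ definition above) =====
theorem gen_states_py_spec : Claim_unchanged_gen_states_py := by
  intro n _ hD
  show gen_states_py n = gen_states_py_alt n
  by_cases hneg : n < 0
  · unfold gen_states_py gen_states_py_alt
    simp [if_pos hneg]
  · have hpos : 1 ≤ n.toNat := by
      unfold D_gen_states_py at hD; omega
    unfold gen_states_py gen_states_py_alt
    simp only [if_neg hneg]
    rw [← pvCanon_eq_go n.toNat]
    unfold pvCanon
    simp only [List.map_map]
    apply List.map_congr_left
    intro i hi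
    simp only [List.mem_range] at hi
    simp only [Function.comp_apply]
    rw [pvBinPad_eq_binRep n.toNat hpos i hi]
    simp [pvDec]

theorem gen_states_py_changed : Claim_changed_gen_states_py := by
  unfold Claim_changed_gen_states_py
  refine ⟨by decide, by decide, by decide, ?_, by decide⟩
  show gen_states_py_alt 0 = [[]]
  decide

theorem gen_states_py_tight : Claim_exact_gen_states_py := by
  intro n _ hD
  unfold D_gen_states_py at hD; subst hD
  decide
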